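-- pv_equiv track=rewrite | github.com/collinsakenga/codewars_solutions | Beta/Simple Syllable Separator SSS.py | syllable_separator
-- ===== SOURCE A (Python) =====
-- def syllable_separator(string):
--     res, arr, add=[], [], False
--     for char in string:
--         arr.append(char)
--         if char in "aeiou":
--             add=True
--         elif add:
--             res.append("".join(arr))
--             add, arr=False, []
--     if arr: res.append("".join(arr))
--     return "-".join(res)
-- ===== SOURCE B (Python) =====
-- def syllable_separator(string):
--     # Stateless pairwise rule: a dash goes after character i exactly when
--     # string[i-1] is a vowel, string[i] is not, and i is not the last index.
--     if not string:
--         return ""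
--     out = [string[0]]
--     for prev, cur in zip(string, string[1:-1]):
--         out.append(cur + "-" if prev in "aeiou" and cur not in "aeiou" else cur)
--     if len(string) > 1:
--         out.append(string[-1])
--     return "".join(out)
-- ===== Notes on version B (the rewrite author's own statement) =====
-- stated objective: simpler
-- what changed: Replaced the buffering state machine (piece list, char buffer, vowel flag, final dash-join) with a stateless single pass over adjacent character pairs that inserts a dash right after any non-vowel preceded by a vowel unless it is the last character.
import Mathlib
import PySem

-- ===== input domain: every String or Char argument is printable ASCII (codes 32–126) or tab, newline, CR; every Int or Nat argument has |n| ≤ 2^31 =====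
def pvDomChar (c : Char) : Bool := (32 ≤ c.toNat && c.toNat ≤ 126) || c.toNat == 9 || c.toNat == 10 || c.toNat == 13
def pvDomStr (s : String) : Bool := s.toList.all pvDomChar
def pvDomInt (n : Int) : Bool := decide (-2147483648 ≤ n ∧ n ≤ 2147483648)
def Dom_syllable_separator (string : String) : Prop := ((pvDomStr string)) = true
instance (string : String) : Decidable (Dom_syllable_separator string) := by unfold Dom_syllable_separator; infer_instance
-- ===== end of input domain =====

-- B replaces A's buffering state machine (piece list / char buffer / vowel flag / final "-".join)
-- with a stateless single pass over adjacent character pairs; objective: simpler.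

-- char in "aeiou"
def pvVowel (c : Char) : Bool := "aeiou".toList.contains c

-- ===== PORT A =====
-- the for-loop of A over (res, arr, add)
def pvALoop : List Char → List String → List Char → Bool → List String × List Char
  | [], res, arr, _ => (res, arr)
  | c :: cs, res, arr, add =>
    let arr2 := arr ++ [c]
    if pvVowel c then pvALoop cs res arr2 true
    else if add then pvALoop cs (res ++ [String.ofList arr2]) [] false
    else pvALoop cs res arr2 add

def syllable_separator (string : String) : String :=
  let ra := pvALoop string.toList [] [] false
  let res := if ra.2 ≠ [] then ra.1 ++ [String.ofList ra.2] else ra.1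
  PySem.Str.join "-" res

-- ===== PORT B =====
def syllable_separator_alt (string : String) : String :=
  match string.toList with
  | [] => ""
  | c0 :: rest =>
    let l := c0 :: rest
    let out : List String := [String.ofList [c0]]
    let out := (List.zip l (PySem.List.slice l (some 1) (some (-1)))).foldl
      (fun out pc =>
        out ++ [if pvVowel pc.1 && !pvVowel pc.2
                then String.ofList [pc.2, '-'] else String.ofList [pc.2]]) out
    let out := if l.length > 1 then out ++ [String.ofList [rest.getLastD c0]] else out
    PySem.Str.join "" out

-- ===== PRECONDITION & SPEC =====
def Spec_syllable_separator (string : String) (out : String) : Prop := out = syllable_separator_alt string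
instance (string : String) (out : String) : Decidable (Spec_syllable_separator string out) := by unfold Spec_syllable_separator; infer_instance

-- ===== CLAIM (what is proved, stated in full; the proofs are below) =====
def Claim_equal_syllable_separator : Prop := ∀ (string : String), Dom_syllable_separator string → Spec_syllable_separator string (syllable_separator string)

-- ===== LEMMAS AND PROOFS =====

-- the list of syllable pieces A accumulates, starting from buffer arr and flag add
def pvPieces : List Char → List Char → Bool → List (List Char)
  | [], arr, _ => if arr ≠ [] then [arr] else []
  | c :: cs, arr, add =>
    if pvVowel c then pvPieces cs (arr ++ [c]) true
    else if add then (arr ++ [c]) :: pvPieces cs [] false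
    else pvPieces cs (arr ++ [c]) add

-- B's dash rule, written as a recursion with the previous-char vowel flag
def pvCanon : Bool → List Char → List Char
  | _, [] => []
  | add, c :: cs =>
    c :: (if add && !pvVowel c && !cs.isEmpty
          then '-' :: pvCanon (pvVowel c) cs else pvCanon (pvVowel c) cs)

theorem pvALoop_pieces : ∀ (cs : List Char) (res : List String) (arr : List Char) (add : Bool),
    (let ra := pvALoop cs res arr add
     if ra.2 ≠ [] then ra.1 ++ [String.ofList ra.2] else ra.1)
      = res ++ (pvPieces cs arr add).map String.ofList := by
  intro cs
  induction cs with
  | nil => intro res arr add; by_cases h : arr = [] <;> simp [pvALoop, pvPieces, h]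
  | cons c cs ih =>
      intro res arr add
      by_cases h1 : pvVowel c
      · simpa [pvALoop, pvPieces, h1] using ih res (arr ++ [c]) true
      · by_cases h2 : add
        · simpa [pvALoop, pvPieces, h1, h2] using
            ih (res ++ [String.ofList (arr ++ [c])]) [] false
        · simpa [pvALoop, pvPieces, h1, h2] using ih res (arr ++ [c]) add

theorem pvPieces_ne_nil : ∀ (cs : List Char) (arr : List Char) (add : Bool),
    cs ≠ [] → pvPieces cs arr add ≠ [] := by
  intro cs
  induction cs with
  | nil => simp
  | cons c cs ih =>
      intro arr add _
      simp only [pvPieces]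
      split_ifs with h1 h2
      · rcases cs with _ | ⟨c', cs'⟩
        · simp [pvPieces]
        · exact ih _ _ (by simp)
      · simp
      · rcases cs with _ | ⟨c', cs'⟩
        · simp [pvPieces]
        · exact ih _ _ (by simp)

theorem pvJoin_cons (sep : List Char) (x : List Char) (r : List (List Char)) :
    PySem.Chars.join sep (x :: r) = x ++ (if r = [] then [] else sep ++ PySem.Chars.join sep r) := by
  rcases r with _ | ⟨y, r⟩
  · simp [PySem.Chars.join_singleton]
  · rw [PySem.Chars.join_cons_cons]; simp

theorem pvJoin_pieces : ∀ (cs arr : List Char) (add : Bool),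
    PySem.Chars.join ['-'] (pvPieces cs arr add) = arr ++ pvCanon add cs := by
  intro cs
  induction cs with
  | nil =>
      intro arr add
      by_cases h : arr = [] <;>
        simp [pvPieces, pvCanon, h, PySem.Chars.join_singleton]
  | cons c cs ih =>
      intro arr add
      by_cases h1 : pvVowel c
      · simpa [pvPieces, pvCanon, h1] using ih (arr ++ [c]) true
      · by_cases h2 : add
        · rcases cs with _ | ⟨c', cs'⟩
          · simp [pvPieces, pvCanon, h1, h2, PySem.Chars.join_singleton]
          · have hne : pvPieces (c' :: cs') [] false ≠ [] :=
              pvPieces_ne_nil _ _ _ (by simp)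
            have hih : PySem.Chars.join ['-'] (pvPieces (c' :: cs') [] false)
                = pvCanon false (c' :: cs') := by simpa using ih [] false
            have hp : pvPieces (c :: c' :: cs') arr add
                = (arr ++ [c]) :: pvPieces (c' :: cs') [] false := by
              simp [pvPieces, h1, h2]
            rw [hp, pvJoin_cons, if_neg hne, hih]
            have h1' : pvVowel c = false := by simpa using h1
            simp [pvCanon, h1', h2]
        · simpa [pvPieces, pvCanon, h1, h2] using ih (arr ++ [c]) add

theorem pvSlice_one_neg_one (l : List Char) (h : l ≠ []) :
    PySem.List.slice l (some 1) (some (-1)) = l.tail.dropLast := by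
  obtain ⟨c, cs, rfl⟩ := List.exists_cons_of_ne_nil h
  unfold PySem.List.slice
  simp [PySem.List.clampIdx, List.dropLast_eq_take]
  split_ifs <;> omega

theorem pvJoin_nil_flatten : ∀ (r : List (List Char)),
    PySem.Chars.join [] r = r.flatten := by
  intro r
  induction r with
  | nil => rfl
  | cons x r ih =>
      rw [pvJoin_cons]
      rcases r with _ | ⟨y, r⟩ <;> simp_all

theorem pvFoldStr : ∀ (ps : List (Char × Char)) (acc : List String),
    (((ps.foldl (fun out pc =>
        out ++ [if pvVowel pc.1 && !pvVowel pc.2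
                then String.ofList [pc.2, '-'] else String.ofList [pc.2]]) acc).map
      String.toList).flatten)
      = (acc.map String.toList).flatten
        ++ ps.flatMap (fun pc => if pvVowel pc.1 && !pvVowel pc.2
                                 then [pc.2, '-'] else [pc.2]) := by
  intro ps
  induction ps with
  | nil => simp
  | cons pc ps ih =>
      intro acc
      simp only [List.foldl_cons, List.flatMap_cons]
      rw [ih]
      simp only [List.map_append, List.flatten_append, List.append_assoc]
      simp
      split_ifs <;> simp

theorem pvBody : ∀ (rest : List Char) (p : Char),
    ((p :: rest).zip rest.dropLast).flatMap
        (fun pc => if pvVowel pc.1 && !pvVowel pc.2 then [pc.2, '-'] else [pc.2])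
      ++ (if rest = [] then [] else [rest.getLastD p])
      = pvCanon (pvVowel p) rest := by
  intro rest
  induction rest with
  | nil => intro p; simp [pvCanon]
  | cons c cs ih =>
      intro p
      rcases cs with _ | ⟨c', cs'⟩
      · simp [pvCanon]
      · have ih' := ih c
        rw [if_neg (by simp : ¬ c' :: cs' = [])] at ih'
        have hz : ((p :: c :: c' :: cs').zip (c :: c' :: cs').dropLast)
            = (p, c) :: ((c :: c' :: cs').zip (c' :: cs').dropLast) := by
          simp [List.dropLast_cons₂]
        have hlast : (c :: c' :: cs').getLastD p = (c' :: cs').getLastD c := by rw [List.getLastD_cons]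
        rw [if_neg (by simp : ¬ c :: c' :: cs' = []), hz, List.flatMap_cons, hlast,
          List.append_assoc, ih']
        by_cases hb : (pvVowel p && !pvVowel c) = true <;> simp [pvCanon, hb]

theorem pvA_toList (string : String) :
    (syllable_separator string).toList = pvCanon false string.toList := by
  have h := pvALoop_pieces string.toList [] [] false
  simp only [syllable_separator]
  rw [h, PySem.Str.toList_join]
  have h2 : List.map String.toList
      ([] ++ List.map String.ofList (pvPieces string.toList [] false))
      = pvPieces string.toList [] false := by
    simp [Function.comp_def]
  rw [h2, show "-".toList = ['-'] from rfl, pvJoin_pieces]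
  simp

theorem pvB_toList (string : String) :
    (syllable_separator_alt string).toList = pvCanon false string.toList := by
  rcases hl : string.toList with _ | ⟨c0, rest⟩
  · simp [syllable_separator_alt, hl, pvCanon]
  · simp only [syllable_separator_alt, hl]
    rw [pvSlice_one_neg_one _ (by simp)]
    rcases hr : rest with _ | ⟨c1, rest'⟩
    · simp [pvCanon, PySem.Str.toList_join]
    · have hlen : (c0 :: c1 :: rest').length > 1 := by simp
      rw [if_pos hlen]
      rw [PySem.Str.toList_join, show "".toList = ([] : List Char) from rfl]
      rw [pvJoin_nil_flatten]
      rw [List.map_append, List.flatten_append]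
      rw [pvFoldStr]
      have hb := pvBody (c1 :: rest') c0
      simp only [if_neg (by simp : ¬(c1 :: rest') = ([] : List Char))] at hb
      simp only [List.map_cons, List.map_nil, List.flatten]
      simp only [List.append_assoc]
      have hc : pvCanon false (c0 :: c1 :: rest') = c0 :: pvCanon (pvVowel c0) (c1 :: rest') := by
        simp [pvCanon]
      rw [hc, ← hb]
      simp


-- ===== VERDICT (by name: the statement is the Claim_ definition above) =====
theorem syllable_separator_spec : Claim_equal_syllable_separator := by
  intro s _
  unfold Spec_syllable_separator
  exact String.toList_inj.mp ((pvA_toList s).trans (pvB_toList s).symm)
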